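-- pv_equiv track=rewrite | github.com/ryanjm/QuoteVaultManager | quote_vault_manager/quote_parser.py | extract_blockquotes
-- ===== SOURCE A (Python) =====
-- from typing import List, Optional, Tuple
--
-- def extract_blockquotes(markdown: str) -> List[str]:
--     """
--     Extracts multiline blockquotes from markdown text.
--     Groups consecutive lines starting with '>' as a single quote.
--     Returns a list of blockquote strings (with leading '> ' removed).
--     """
--     blockquotes = []
--     current = []
--     for line in markdown.splitlines():
--         if line.strip().startswith('>'):
--             current.append(line.lstrip('> ').rstrip())
--         else:
--             if current:
--                 blockquotes.append('\n'.join(current).strip())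
--                 current = []
--     if current:
--         blockquotes.append('\n'.join(current).strip())
--     return blockquotes
-- ===== SOURCE B (Python) =====
-- def extract_blockquotes(markdown):
--     """Two-pointer scan: find each maximal run of '>'-lines and emit it directly."""
--     lines = markdown.splitlines()
--     out = []
--     i, n = 0, len(lines)
--     while i < n:
--         if lines[i].strip().startswith('>'):
--             j = i
--             while j < n and lines[j].strip().startswith('>'):
--                 j += 1
--             out.append('\n'.join(l.lstrip('> ').rstrip() for l in lines[i:j]).strip())
--             i = j
--         else:
--             i += 1
--     return out
-- ===== Notes on version B (the rewrite author's own statement) =====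
-- stated objective: alternative
-- what changed: Replaces A's accumulator-and-flush state machine (a pending current list flushed on non-quote lines and again after the loop) with a two-pointer scan that locates each maximal run of blockquote lines and emits its joined quote directly, with no pending state and no post-loop flush.
import Mathlib
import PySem

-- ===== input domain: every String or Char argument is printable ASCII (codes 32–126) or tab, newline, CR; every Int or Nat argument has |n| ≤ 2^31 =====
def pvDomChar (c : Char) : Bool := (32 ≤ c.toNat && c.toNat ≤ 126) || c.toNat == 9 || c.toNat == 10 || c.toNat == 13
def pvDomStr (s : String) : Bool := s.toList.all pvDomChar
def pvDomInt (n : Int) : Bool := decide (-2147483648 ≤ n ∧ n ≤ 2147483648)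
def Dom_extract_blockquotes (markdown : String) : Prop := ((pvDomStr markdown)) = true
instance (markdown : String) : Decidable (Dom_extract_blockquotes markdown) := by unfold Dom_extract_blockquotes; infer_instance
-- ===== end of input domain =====

-- B replaces A's accumulator-and-flush loop by a two-pointer scan over maximal runs of blockquote lines (alternative decomposition, same cost).

-- ===== PORT A =====
-- line.strip().startswith('>')
def pvLineKey (line : String) : Bool := PySem.Str.startswith (PySem.Str.strip line) ">"
-- line.lstrip('> ').rstrip() — lstrip('> ') ported by hand as dropWhile over the char set {'>',' '}, exact
def pvLineXform (line : String) : String :=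
  PySem.Str.rstrip (String.ofList (line.toList.dropWhile (fun c => c == '>' || c == ' ')))
-- '\n'.join(cur).strip()
def pvFinish (cur : List String) : String := PySem.Str.strip (PySem.Str.join "\n" cur)

def pvStepA (st : List String × List String) (line : String) : List String × List String :=
  if pvLineKey line then (st.1, st.2 ++ [pvLineXform line])
  else if st.2 ≠ [] then (st.1 ++ [pvFinish st.2], ([] : List String)) else st

def pvFlushA (st : List String × List String) : List String :=
  if st.2 ≠ [] then st.1 ++ [pvFinish st.2] else st.1

def extract_blockquotes (markdown : String) : List String :=
  pvFlushA ((PySem.Str.splitlines markdown).foldl pvStepA ([], []))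

-- ===== PORT B =====
-- the inner two-pointer scan: lines[i:j] is the maximal key-true run = l :: takeWhile; i = j resumes after it
def pvRuns : List String → List String
  | [] => []
  | l :: t =>
    if pvLineKey l then
      pvFinish ((l :: t.takeWhile pvLineKey).map pvLineXform) :: pvRuns (t.dropWhile pvLineKey)
    else pvRuns t
termination_by ls => ls.length
decreasing_by
  · have := List.length_dropWhile_le pvLineKey t; simp; omega
  · simp

def extract_blockquotes_alt (markdown : String) : List String :=
  pvRuns (PySem.Str.splitlines markdown)

-- ===== PRECONDITION & SPEC =====
def Spec_extract_blockquotes (markdown : String) (out : List String) : Prop := out = extract_blockquotes_alt markdown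
instance (markdown : String) (out : List String) : Decidable (Spec_extract_blockquotes markdown out) := by unfold Spec_extract_blockquotes; infer_instance

-- ===== CLAIM (what is proved, stated in full; the proofs are below) =====
def Claim_equal_extract_blockquotes : Prop := ∀ (markdown : String), Dom_extract_blockquotes markdown → Spec_extract_blockquotes markdown (extract_blockquotes markdown)

-- ===== LEMMAS AND PROOFS =====

/-- B's value on lines with a pending (already-transformed) run `cur` prepended to the first run. -/
def pvBoutC (cur : List String) (ls : List String) : List String :=
  (if cur ++ (ls.takeWhile pvLineKey).map pvLineXform = [] then []
   else [pvFinish (cur ++ (ls.takeWhile pvLineKey).map pvLineXform)]) ++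
  pvRuns (ls.dropWhile pvLineKey)

lemma pvBoutC_nil (ls : List String) : pvBoutC [] ls = pvRuns ls := by
  cases ls with
  | nil => simp [pvBoutC, pvRuns]
  | cons l t =>
    by_cases h : pvLineKey l = true
    · simp [pvBoutC, pvRuns, h]
    · simp [pvBoutC, pvRuns, h]

lemma pvFold (ls : List String) : ∀ (acc cur : List String),
    pvFlushA (ls.foldl pvStepA (acc, cur)) = acc ++ pvBoutC cur ls := by
  induction ls with
  | nil =>
    intro acc cur
    cases cur with
    | nil => simp [pvFlushA, pvBoutC, pvRuns]
    | cons c cs => simp [pvFlushA, pvBoutC, pvRuns]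
  | cons l t ih =>
    intro acc cur
    by_cases h : pvLineKey l = true
    · have : pvStepA (acc, cur) l = (acc, cur ++ [pvLineXform l]) := by
        simp [pvStepA, h]
      rw [List.foldl_cons, this, ih]
      simp [pvBoutC, h]
    · cases cur with
      | nil =>
        have : pvStepA (acc, []) l = (acc, []) := by simp [pvStepA, h]
        rw [List.foldl_cons, this, ih, pvBoutC_nil]
        have : pvBoutC [] (l :: t) = pvRuns t := by
          rw [pvBoutC_nil]; simp [pvRuns, h]
        rw [this]
      | cons c cs =>
        have : pvStepA (acc, c :: cs) l = (acc ++ [pvFinish (c :: cs)], []) := by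
          simp [pvStepA, h]
        rw [List.foldl_cons, this, ih, pvBoutC_nil]
        have hb : pvBoutC (c :: cs) (l :: t) = pvFinish (c :: cs) :: pvRuns t := by
          simp [pvBoutC, h, pvRuns]
        rw [hb]
        have : pvRuns (l :: t) = pvRuns t := by simp [pvRuns, h]
        simp

-- ===== VERDICT (by name: the statement is the Claim_ definition above) =====
theorem extract_blockquotes_spec : Claim_equal_extract_blockquotes := by
  intro markdown _
  show extract_blockquotes markdown = extract_blockquotes_alt markdown
  rw [extract_blockquotes, extract_blockquotes_alt, pvFold, pvBoutC_nil, List.nil_append]
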